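-- pv_equiv track=rewrite | github.com/Ace1928/eidosian_forge | archive_forge/code/func_quoted_token_parser.py | quoted_token_parser
-- ===== SOURCE A (Python) =====
-- from typing import List
--
-- def quoted_token_parser(value):
--     """Parse a dotted identifier with accommodation for quoted names.
--
--     Includes support for SQL-style double quotes as a literal character.
--
--     E.g.::
--
--         >>> quoted_token_parser("name")
--         ["name"]
--         >>> quoted_token_parser("schema.name")
--         ["schema", "name"]
--         >>> quoted_token_parser('"Schema"."Name"')
--         ['Schema', 'Name']
--         >>> quoted_token_parser('"Schema"."Name""Foo"')
--         ['Schema', 'Name""Foo']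
--
--     """
--     if '"' not in value:
--         return value.split('.')
--     state = 0
--     result: List[List[str]] = [[]]
--     idx = 0
--     lv = len(value)
--     while idx < lv:
--         char = value[idx]
--         if char == '"':
--             if state == 1 and idx < lv - 1 and (value[idx + 1] == '"'):
--                 result[-1].append('"')
--                 idx += 1
--             else:
--                 state ^= 1
--         elif char == '.' and state == 0:
--             result.append([])
--         else:
--             result[-1].append(char)
--         idx += 1
--     return [''.join(token) for token in result]
-- ===== SOURCE B (Python) =====
-- def _decode(field):
--     """Decode one raw field: drop quote characters, collapsing a doubled
--     quote inside a quoted region into a single literal quote."""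
--     out = []
--     i = 0
--     n = len(field)
--     inside = False
--     while i < n:
--         c = field[i]
--         if c == '"':
--             if inside and i + 1 < n and field[i + 1] == '"':
--                 out.append('"')
--                 i += 2
--                 continue
--             inside = not inside
--         else:
--             out.append(c)
--         i += 1
--     return ''.join(out)
--
--
-- def quoted_token_parser(value):
--     # Phase 1: split at dots that lie outside quotes (quote parity scan).
--     fields = []
--     cur = []
--     in_quote = False
--     for ch in value:
--         if ch == '"':
--             in_quote = not in_quote
--             cur.append(ch)
--         elif ch == '.' and not in_quote:
--             fields.append(''.join(cur))
--             cur = []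
--         else:
--             cur.append(ch)
--     fields.append(''.join(cur))
--     # Phase 2: decode each raw field independently.
--     return [_decode(f) for f in fields]
-- ===== Notes on version B (the rewrite author's own statement) =====
-- stated objective: alternative
-- what changed: A is a single flat character state machine that mutates the last entry of a list-of-lists as it goes; B first splits the string into raw fields at the dots that lie outside quotes via a simple quote-parity scan (no escape handling needed there), then decodes each raw field independently with a per-field quote/escape pass.
import Mathlib
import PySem

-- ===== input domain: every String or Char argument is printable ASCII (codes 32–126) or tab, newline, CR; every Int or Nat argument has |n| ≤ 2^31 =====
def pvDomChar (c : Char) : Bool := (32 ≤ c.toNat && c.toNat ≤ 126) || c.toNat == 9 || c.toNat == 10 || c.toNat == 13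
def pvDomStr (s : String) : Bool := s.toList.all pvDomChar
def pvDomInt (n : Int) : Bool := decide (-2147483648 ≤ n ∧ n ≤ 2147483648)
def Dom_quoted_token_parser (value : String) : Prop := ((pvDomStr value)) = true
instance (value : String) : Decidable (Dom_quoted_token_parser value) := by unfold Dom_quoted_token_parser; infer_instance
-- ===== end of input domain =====

-- B replaces A's single flat state machine by a two-phase decomposition (parity split
-- into raw fields, then a per-field quote decode); objective: alternative structure, same cost.

-- ===== PORT A =====
-- result[-1].append(c)
def pvA_appendLast (r : List (List Char)) (c : Char) : List (List Char) :=
  match r with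
  | [] => []
  | [t] => [t ++ [c]]
  | t :: ts => t :: pvA_appendLast ts c

-- the while loop of A: state ∈ {0,1}, result is the list of partial tokens
def pvA_loop (state : Nat) (cs : List Char) (result : List (List Char)) : List (List Char) :=
  match cs with
  | [] => result
  | c :: rest =>
    if c = '"' then
      if state = 1 ∧ rest.head? = some '"' then
        pvA_loop 1 rest.tail (pvA_appendLast result '"')
      else
        pvA_loop (state ^^^ 1) rest result
    else if c = '.' ∧ state = 0 then
      pvA_loop state rest (result ++ [[]])
    else
      pvA_loop state rest (pvA_appendLast result c)
termination_by cs.length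
decreasing_by all_goals simp

def quoted_token_parser (value : String) : List String :=
  if PySem.Chars.isIn ['"'] value.toList = false then
    (PySem.Chars.splitOn value.toList ['.']).map String.ofList
  else
    (pvA_loop 0 value.toList [[]]).map String.ofList

-- ===== PORT B =====
-- phase 2: decode one raw field (collapse a doubled quote inside quotes, drop quote marks)
def pvB_decode (inside : Bool) (cs : List Char) : List Char :=
  match cs with
  | [] => []
  | c :: rest =>
    if c = '"' then
      if inside ∧ rest.head? = some '"' then '"' :: pvB_decode true rest.tail
      else pvB_decode (!inside) rest
    else c :: pvB_decode inside rest
termination_by cs.length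
decreasing_by all_goals simp

-- phase 1: split at dots outside quotes (quote-parity scan), keeping the raw characters
def pvB_split (inQuote : Bool) (cs : List Char) (cur : List Char) (fields : List (List Char)) :
    List (List Char) :=
  match cs with
  | [] => fields ++ [cur]
  | c :: rest =>
    if c = '"' then pvB_split (!inQuote) rest (cur ++ [c]) fields
    else if c = '.' ∧ inQuote = false then pvB_split inQuote rest [] (fields ++ [cur])
    else pvB_split inQuote rest (cur ++ [c]) fields

def quoted_token_parser_alt (value : String) : List String :=
  (pvB_split false value.toList [] []).map (fun f => String.ofList (pvB_decode false f))

-- ===== PRECONDITION & SPEC =====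
def Spec_quoted_token_parser (value : String) (out : List String) : Prop := out = quoted_token_parser_alt value
instance (value : String) (out : List String) : Decidable (Spec_quoted_token_parser value out) := by unfold Spec_quoted_token_parser; infer_instance

-- ===== CLAIM (what is proved, stated in full; the proofs are below) =====
def Claim_equal_quoted_token_parser : Prop := ∀ (value : String), Dom_quoted_token_parser value → Spec_quoted_token_parser value (quoted_token_parser value)

-- ===== LEMMAS AND PROOFS =====

theorem pvA_appendLast_append (done : List (List Char)) (t : List Char) (c : Char) :
    pvA_appendLast (done ++ [t]) c = done ++ [t ++ [c]] := by
  induction done with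
  | nil => simp [pvA_appendLast]
  | cons d ds ih =>
    show pvA_appendLast (d :: (ds ++ [t])) c = d :: (ds ++ [t ++ [c]])
    cases h : ds ++ [t] with
    | nil => simp at h
    | cons x xs =>
      rw [show pvA_appendLast (d :: x :: xs) c = d :: pvA_appendLast (x :: xs) c from rfl,
        ← h, ih]

theorem pvB_split_quote (b : Bool) (rest cur : List Char) (fields : List (List Char)) :
    pvB_split b ('"' :: rest) cur fields = pvB_split (!b) rest (cur ++ ['"']) fields := by
  simp [pvB_split]

theorem pvB_split_dot (rest cur : List Char) (fields : List (List Char)) :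
    pvB_split false ('.' :: rest) cur fields = pvB_split false rest [] (fields ++ [cur]) := by
  simp [pvB_split]

theorem pvB_split_other (b : Bool) (c : Char) (rest cur : List Char)
    (fields : List (List Char)) (hc : c ≠ '"') (h : ¬(c = '.' ∧ b = false)) :
    pvB_split b (c :: rest) cur fields = pvB_split b rest (cur ++ [c]) fields := by
  simp only [pvB_split, if_neg hc]
  rw [if_neg h]

theorem pvB_split_fields (cs : List Char) (b : Bool) (cur : List Char)
    (fields : List (List Char)) :
    pvB_split b cs cur fields = fields ++ pvB_split b cs cur [] := by
  induction cs generalizing b cur fields with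
  | nil => simp [pvB_split]
  | cons c rest ih =>
    by_cases hc : c = '"'
    · subst hc
      rw [pvB_split_quote, pvB_split_quote, ih]
    · by_cases hd : c = '.' ∧ b = false
      · obtain ⟨h1, h2⟩ := hd
        subst h1; subst h2
        rw [pvB_split_dot, pvB_split_dot, ih false [] (fields ++ [cur]),
          ih false [] ([] ++ [cur])]
        simp
      · rw [pvB_split_other b c rest cur fields hc hd,
          pvB_split_other b c rest cur [] hc hd, ih]

theorem pvB_split_cur (cs : List Char) (b : Bool) (cur : List Char) :
    pvB_split b cs cur [] =
      (cur ++ (pvB_split b cs [] []).headI) :: (pvB_split b cs [] []).tail := by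
  induction cs generalizing b cur with
  | nil => simp [pvB_split]
  | cons c rest ih =>
    by_cases hc : c = '"'
    · subst hc
      rw [pvB_split_quote, pvB_split_quote, ih, ih (!b) ([] ++ ['"'])]
      simp
    · by_cases hd : c = '.' ∧ b = false
      · obtain ⟨h1, h2⟩ := hd
        subst h1; subst h2
        rw [pvB_split_dot, pvB_split_dot, pvB_split_fields rest false [] ([] ++ [cur]),
          pvB_split_fields rest false [] ([] ++ [[]])]
        simp
      · rw [pvB_split_other b c rest cur [] hc hd, pvB_split_other b c rest [] [] hc hd,
          ih, ih b ([] ++ [c])]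
        simp

theorem pvB_split_ne_nil (cs : List Char) (b : Bool) (cur : List Char)
    (fields : List (List Char)) : pvB_split b cs cur fields ≠ [] := by
  induction cs generalizing b cur fields with
  | nil => simp [pvB_split]
  | cons c rest ih =>
    simp only [pvB_split]
    split_ifs with h1 h2
    · exact ih _ _ _
    · exact ih _ _ _
    · exact ih _ _ _

theorem pvB_head_field_quote (cs : List Char) (b : Bool)
    (h : (pvB_split b cs [] []).headI.head? = some '"') : cs.head? = some '"' := by
  cases cs with
  | nil => simp [pvB_split] at h
  | cons c rest =>
    by_cases hc : c = '"'
    · simp [hc]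
    · exfalso
      by_cases hd : c = '.' ∧ b = false
      · obtain ⟨h1, h2⟩ := hd
        subst h1; subst h2
        rw [pvB_split_dot, pvB_split_fields rest false [] ([] ++ [[]])] at h
        simp at h
      · rw [pvB_split_other b c rest [] [] hc hd, pvB_split_cur rest b ([] ++ [c])] at h
        simp at h
        exact hc h

theorem pv_main (cs : List Char) (b : Bool) (done : List (List Char)) (t : List Char) :
    pvA_loop (if b then 1 else 0) cs (done ++ [t]) =
      done ++ (t ++ pvB_decode b (pvB_split b cs [] []).headI) ::
        ((pvB_split b cs [] []).tail.map (pvB_decode false)) := by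
  cases cs with
  | nil => simp [pvA_loop, pvB_split, pvB_decode]
  | cons c rest =>
    by_cases hc : c = '"'
    · subst hc
      cases b with
      | false =>
        -- open the quote: state 0 → 1, in_quote false → true
        have hA : pvA_loop (if false then 1 else 0) ('"' :: rest) (done ++ [t]) =
            pvA_loop (if true then 1 else 0) rest (done ++ [t]) := by
          simp [pvA_loop]
        rw [hA, pv_main rest true done t, pvB_split_quote]
        simp only [Bool.not_false]
        rw [pvB_split_cur rest true ([] ++ ['"'])]
        simp [pvB_decode]
      | true =>
        rcases hr : rest with _ | ⟨c2, rest2⟩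
        · -- closing quote at end of string
          have hA : pvA_loop (if true then 1 else 0) ['"'] (done ++ [t]) =
              pvA_loop 0 [] (done ++ [t]) := by
            simp [pvA_loop]
          rw [hA]
          simp [pvA_loop, pvB_split, pvB_decode]
        · by_cases hc2 : c2 = '"'
          · -- escaped double quote inside quotes
            subst hc2
            have hA : pvA_loop (if true then 1 else 0) ('"' :: '"' :: rest2) (done ++ [t]) =
                pvA_loop 1 rest2 (pvA_appendLast (done ++ [t]) '"') := by
              simp [pvA_loop]
            rw [hA, pvA_appendLast_append,
              show (1 : Nat) = (if true then 1 else 0) from rfl,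
              pv_main rest2 true done (t ++ ['"']), pvB_split_quote, pvB_split_quote]
            simp only [Bool.not_false, Bool.not_true]
            rw [pvB_split_cur rest2 true ([] ++ ['"'] ++ ['"'])]
            simp [pvB_decode]
          · -- closing quote: state 1 → 0
            have hA : pvA_loop (if true then 1 else 0) ('"' :: c2 :: rest2) (done ++ [t]) =
                pvA_loop (if false then 1 else 0) (c2 :: rest2) (done ++ [t]) := by
              simp [pvA_loop, hc2]
            rw [hA, pv_main (c2 :: rest2) false done t, pvB_split_quote]
            simp only [Bool.not_true]
            rw [pvB_split_cur (c2 :: rest2) false ([] ++ ['"'])]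
            have hh : ((pvB_split false (c2 :: rest2) [] []).headI).head? ≠ some '"' := by
              intro hcon
              have := pvB_head_field_quote (c2 :: rest2) false hcon
              simp at this
              exact hc2 this
            simp only [List.headI_cons, List.tail_cons, List.nil_append]
            cases hH : (pvB_split false (c2 :: rest2) [] []).headI with
            | nil => simp [pvB_decode]
            | cons d ds =>
              rw [hH] at hh
              simp only [List.head?_cons, ne_eq, Option.some.injEq] at hh
              simp [pvB_decode, hh]
    · by_cases hd : c = '.' ∧ b = false
      · -- a splitting dot outside quotes
        obtain ⟨hdot, hbf⟩ := hd
        subst hdot; subst hbf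
        have hA : pvA_loop (if false then 1 else 0) ('.' :: rest) (done ++ [t]) =
            pvA_loop (if false then 1 else 0) rest ((done ++ [t]) ++ [[]]) := by
          simp [pvA_loop]
        rw [hA, pv_main rest false (done ++ [t]) [], pvB_split_dot,
          pvB_split_fields rest false [] ([] ++ [[]])]
        obtain ⟨f, fs, hS⟩ := List.exists_cons_of_ne_nil (pvB_split_ne_nil rest false [] [])
        rw [hS]
        simp [pvB_decode]
      · -- ordinary character (or a dot inside quotes): appended verbatim
        have hA : pvA_loop (if b then 1 else 0) (c :: rest) (done ++ [t]) =
            pvA_loop (if b then 1 else 0) rest (pvA_appendLast (done ++ [t]) c) := by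
          cases b with
          | false =>
            simp only [pvA_loop, if_neg hc]
            rw [if_neg]
            intro hcon
            exact hd ⟨hcon.1, rfl⟩
          | true =>
            simp [pvA_loop, hc]
        rw [hA, pvA_appendLast_append, pv_main rest b done (t ++ [c]),
          pvB_split_other b c rest [] [] hc hd, pvB_split_cur rest b ([] ++ [c])]
        simp [pvB_decode, hc]
termination_by cs.length
decreasing_by all_goals simp_all

theorem pvB_decode_id (b : Bool) (f : List Char) (h : '"' ∉ f) : pvB_decode b f = f := by
  induction f generalizing b with
  | nil => simp [pvB_decode]
  | cons c rest ih =>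
    have hc : c ≠ '"' := fun hcon => h (hcon ▸ List.mem_cons_self ..)
    simp only [pvB_decode, if_neg hc]
    rw [ih b (fun hm => h (List.mem_cons_of_mem _ hm))]

theorem pvB_split_no_quote (cs : List Char) (b : Bool) (cur : List Char)
    (fields : List (List Char)) (hcs : '"' ∉ cs) (hcur : '"' ∉ cur)
    (hf : ∀ f ∈ fields, '"' ∉ f) :
    ∀ f ∈ pvB_split b cs cur fields, '"' ∉ f := by
  induction cs generalizing b cur fields with
  | nil =>
    intro f hmem
    simp only [pvB_split] at hmem
    rcases List.mem_append.mp hmem with h1 | h1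
    · exact hf f h1
    · simp at h1
      exact h1 ▸ hcur
  | cons c rest ih =>
    have hc : c ≠ '"' := fun hcon => hcs (hcon ▸ List.mem_cons_self ..)
    have hrest : '"' ∉ rest := fun hm => hcs (List.mem_cons_of_mem _ hm)
    simp only [pvB_split, if_neg hc]
    split_ifs with h2
    · refine ih b [] (fields ++ [cur]) hrest (by simp) ?_
      intro f hmem
      rcases List.mem_append.mp hmem with h1 | h1
      · exact hf f h1
      · simp at h1
        exact h1 ▸ hcur
    · refine ih b (cur ++ [c]) fields hrest ?_ hf
      intro hm
      rcases List.mem_append.mp hm with h1 | h1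
      · exact hcur h1
      · simp at h1
        exact hc h1.symm

theorem pv_splitOn_go (fuel : Nat) (l cur : List Char) (acc : List (List Char))
    (hfuel : l.length < fuel) (hl : '"' ∉ l) :
    PySem.Chars.splitOn.go ['.'] fuel l cur acc =
      acc.reverse ++ pvB_split false l cur.reverse [] := by
  induction fuel generalizing l cur acc with
  | zero => omega
  | succ fuel ih =>
    cases l with
    | nil => simp [PySem.Chars.splitOn.go, pvB_split]
    | cons c rest =>
      have hrest : '"' ∉ rest := fun hm => hl (List.mem_cons_of_mem _ hm)
      have hc : c ≠ '"' := fun hcon => hl (hcon ▸ List.mem_cons_self ..)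
      by_cases hdot : c = '.'
      · subst hdot
        have hpre : List.isPrefixOf ['.'] ('.' :: rest) = true := by simp [List.isPrefixOf]
        simp only [PySem.Chars.splitOn.go, hpre, if_true, List.length_cons, List.length_nil,
          Nat.zero_add, List.drop_succ_cons, List.drop_zero]
        rw [ih rest [] (cur.reverse :: acc) (by simpa using Nat.lt_of_succ_lt_succ hfuel) hrest,
          pvB_split_dot, pvB_split_fields rest false [] ([] ++ [cur.reverse])]
        simp
      · have hpre : List.isPrefixOf ['.'] (c :: rest) = false := by
          simp [List.isPrefixOf]
          intro hcon
          exact hdot hcon.symm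
        simp only [PySem.Chars.splitOn.go, hpre, Bool.false_eq_true, if_false]
        rw [ih rest (c :: cur) acc (by simpa using Nat.lt_of_succ_lt_succ hfuel) hrest,
          pvB_split_other false c rest cur.reverse [] hc (fun hcon => hdot hcon.1)]
        simp

-- ===== VERDICT (by name: the statement is the Claim_ definition above) =====
theorem quoted_token_parser_spec : Claim_equal_quoted_token_parser := by
  intro value _
  unfold Spec_quoted_token_parser quoted_token_parser quoted_token_parser_alt
  by_cases hq : PySem.Chars.isIn ['"'] value.toList = false
  · rw [if_pos hq]
    have hnq : '"' ∉ value.toList := by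
      intro hm
      have : PySem.Chars.isIn ['"'] value.toList = true :=
        (PySem.Chars.isIn_iff_infix _ _).mpr ((List.singleton_infix_iff _ _).mpr hm)
      rw [hq] at this
      exact Bool.false_ne_true this
    have hsplit : PySem.Chars.splitOn value.toList ['.'] =
        pvB_split false value.toList [] [] := by
      unfold PySem.Chars.splitOn
      rw [pv_splitOn_go (value.toList.length + 1) value.toList [] []
        (Nat.lt_succ_self _) hnq]
      simp
    rw [hsplit]
    refine List.map_congr_left ?_
    intro f hf
    rw [pvB_decode_id false f
      (pvB_split_no_quote value.toList false [] [] hnq (by simp) (by simp) f hf)]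
  · rw [if_neg hq]
    have h0 : pvA_loop 0 value.toList [[]] =
        ([] : List (List Char)) ++
          (([] : List Char) ++ pvB_decode false (pvB_split false value.toList [] []).headI) ::
          ((pvB_split false value.toList [] []).tail.map (pvB_decode false)) :=
      pv_main value.toList false [] []
    obtain ⟨f, fs, hS⟩ :=
      List.exists_cons_of_ne_nil (pvB_split_ne_nil value.toList false [] [])
    rw [h0, hS]
    simp
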